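-- pv_equiv track=rewrite | github.com/Halgamoos/Interview-Prep | Solutions/longest_allieration.py | solve
-- ===== SOURCE A (Python) =====
-- def solve(words):
--     maxcnt, cnt = 0, 1
--     prev_char = ""
--     for word in words:
--         if prev_char == "":
--             prev_char = word[0]
--         elif prev_char == word[0]:
--             cnt += 1
--         else:
--             prev_char = word[0]
--             cnt = 1
--         maxcnt = max(maxcnt, cnt)
--     return maxcnt
-- ===== SOURCE B (Python) =====
-- def solve(words):
--     firsts = [w[0] for w in words]
--     n = len(firsts)
--     best = 0
--     i = 0
--     while i < n:
--         j = i + 1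
--         while j < n and firsts[j] == firsts[i]:
--             j += 1
--         best = max(best, j - i)
--         i = j
--     return best
-- ===== Notes on version B (the rewrite author's own statement) =====
-- stated objective: alternative
-- what changed: Replaces A's single-pass state machine carrying (maxcnt, cnt, prev_char) by a recursive run-splitting decomposition: extract the maximal leading run of equal first letters, recurse on the remainder, take the max.
import Mathlib
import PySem

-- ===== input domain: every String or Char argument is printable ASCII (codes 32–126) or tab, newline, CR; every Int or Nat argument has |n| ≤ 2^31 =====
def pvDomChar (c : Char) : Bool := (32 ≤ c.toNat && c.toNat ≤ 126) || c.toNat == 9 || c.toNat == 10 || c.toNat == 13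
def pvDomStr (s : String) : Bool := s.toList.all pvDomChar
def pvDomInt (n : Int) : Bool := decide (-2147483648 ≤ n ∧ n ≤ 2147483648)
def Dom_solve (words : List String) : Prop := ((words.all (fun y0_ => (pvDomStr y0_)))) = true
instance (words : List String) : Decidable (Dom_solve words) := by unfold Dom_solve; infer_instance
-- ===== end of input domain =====

-- B replaces A's single-pass (maxcnt, cnt, prev_char) state machine by a two-pointer
-- run-peeling decomposition over the list of first letters (alternative, same cost).

-- word[0] as a Char; the .getD default is unreachable under Pre_solve (empty word = IndexError)
def pvFirst (w : String) : Char := (PySem.Str.pyGet? w 0).getD ' '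

-- ===== PORT A =====
-- the loop body; prev_char = "" is modelled as none, prev_char = single-char string as some c
def solveStep (s : Int × Int × Option Char) (c : Char) : Int × Int × Option Char :=
  match s with
  | (maxcnt, cnt, prev) =>
    match prev with
    | none => (max maxcnt cnt, cnt, some c)
    | some p =>
      if p == c then (max maxcnt (cnt + 1), cnt + 1, some p)
      else (max maxcnt 1, 1, some c)

def solve (words : List String) : Int :=
  (words.foldl (fun s w => solveStep s (pvFirst w)) (0, 1, none)).1

-- ===== PORT B =====
-- Source B's inner while loop: the run firsts[i..j) as (its extra length beyond i, the remainder firsts[j..])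
def splitRun (c : Char) : List Char → Nat × List Char
  | [] => (0, [])
  | x :: xs => if x == c then let p := splitRun c xs; (p.1 + 1, p.2) else (0, x :: xs)

theorem splitRun_len (c : Char) (xs : List Char) : (splitRun c xs).2.length ≤ xs.length := by
  induction xs with
  | nil => simp [splitRun]
  | cons x xs ih =>
    simp only [splitRun]
    split
    · exact Nat.le_succ_of_le ih
    · simp

-- Source B's outer while loop: peel one run, fold best through
def runsLoop : List Char → Int → Int
  | [], best => best
  | c :: xs, best =>
    let p := splitRun c xs
    runsLoop p.2 (max best ((1 + p.1 : Nat) : Int))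
termination_by xs => xs.length
decreasing_by exact Nat.lt_succ_of_le (splitRun_len _ _)

def solve_alt (words : List String) : Int := runsLoop (words.map pvFirst) 0

-- ===== PRECONDITION & SPEC =====
-- Pre_ excludes lists containing an empty word, on which Python A raises IndexError at word[0].
def Pre_solve (words : List String) : Prop := (words.all (fun w => !(w == ""))) = true
instance (words : List String) : Decidable (Pre_solve words) := by unfold Pre_solve; infer_instance
def pvWitness_solve : List String := (["ant", "apple", "bee", "bat", "cat"])

def Spec_solve (words : List String) (out : Int) : Prop := out = solve_alt words
instance (words : List String) (out : Int) : Decidable (Spec_solve words out) := by unfold Spec_solve; infer_instance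

-- ===== CLAIM (what is proved, stated in full; the proofs are below) =====
def Claim_equal_solve : Prop := ∀ (words : List String), Dom_solve words → Pre_solve words → Spec_solve words (solve words)

-- ===== LEMMAS AND PROOFS =====

-- invariant of A's loop from a state already holding a previous character
theorem foldl_solveStep (fs : List Char) :
    ∀ (m k : Int) (p : Char), 1 ≤ k → k ≤ m →
      (fs.foldl solveStep (m, k, some p)).1
        = runsLoop (splitRun p fs).2 (max m (k + ((splitRun p fs).1 : Int))) := by
  induction fs with
  | nil =>
    intro m k p hk hm
    simp only [List.foldl_nil, splitRun, runsLoop]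
    omega
  | cons x xs ih =>
    intro m k p hk hm
    by_cases hx : x = p
    · subst hx
      simp only [List.foldl_cons, solveStep, beq_self_eq_true, if_true, splitRun]
      rw [ih (max m (k + 1)) (k + 1) x (by omega) (le_max_right _ _)]
      congr 1
      push_cast
      omega
    · have hbx : (x == p) = false := by simp [hx]
      have hpx : (p == x) = false := by simp [Ne.symm hx]
      simp only [List.foldl_cons, solveStep, hpx, splitRun, hbx,
        if_neg (by simp : ¬ (false = true))]
      rw [ih (max m 1) 1 x (le_refl _) (le_max_right _ _)]
      rw [runsLoop]
      congr 1
      push_cast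
      omega

theorem foldl_eq_runsLoop (fs : List Char) :
    (fs.foldl solveStep (0, 1, none)).1 = runsLoop fs 0 := by
  cases fs with
  | nil => simp [runsLoop]
  | cons c fs =>
    simp only [List.foldl_cons, solveStep]
    rw [foldl_solveStep fs (max 0 1) 1 c (le_refl _) (le_max_right _ _)]
    rw [runsLoop]
    congr 1
    push_cast
    omega

-- ===== VERDICT (by name: the statement is the Claim_ definition above) =====
theorem solve_spec : Claim_equal_solve := by
  intro words _ _
  show solve words = solve_alt words
  unfold solve solve_alt
  rw [← List.foldl_map (f := pvFirst) (g := solveStep)]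
  exact foldl_eq_runsLoop _
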